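-- pv_equiv track=rewrite | github.com/David-Valters/Animevost_CLI | inst.py | get_shortened_name
-- ===== SOURCE A (Python) =====
-- def get_str_size(s):
--     return len(s.encode('utf-8'))
--
-- def get_shortened_name(name,max_size):
--     P=name.rfind('(')
--     if (P!=-1 and  name.find(')')!=-1):
--         dop_len=get_str_size(name[P:])
--         p=P
--         while (get_str_size(name[:p])>max_size-dop_len-2):
--             p-=2
--         return name[:p]+"..."+name[P:]
--     else:
--         pos=len(name)
--         while(get_str_size(name[:pos])>max_size):
--             pos-=2
--         return name[:pos]+'...'
-- ===== SOURCE B (Python) =====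
-- def get_shortened_name(name, max_size):
--     n = len(name)
--     P = name.rfind('(')
--     if P != -1 and ')' in name:
--         budget = max_size - (n - P) - 2
--         start, tail = P, name[P:]
--     else:
--         budget = max_size
--         start, tail = n, ''
--     if start <= budget:
--         keep = start
--     else:
--         keep = budget - ((start - budget) % 2)
--         if keep < 0:
--             keep = 0
--     return name[:keep] + '...' + tail
-- ===== Notes on version B (the rewrite author's own statement) =====
-- stated objective: faster
-- what changed: B computes the kept prefix length in closed form (budget minus a parity correction, clamped at 0) instead of A's step-by-2 while loop that re-slices and re-encodes the string on every iteration; Pre_ excludes the inputs on which A's while loop never terminates (negative remaining byte budget), where A returns no value.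
import Mathlib
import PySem

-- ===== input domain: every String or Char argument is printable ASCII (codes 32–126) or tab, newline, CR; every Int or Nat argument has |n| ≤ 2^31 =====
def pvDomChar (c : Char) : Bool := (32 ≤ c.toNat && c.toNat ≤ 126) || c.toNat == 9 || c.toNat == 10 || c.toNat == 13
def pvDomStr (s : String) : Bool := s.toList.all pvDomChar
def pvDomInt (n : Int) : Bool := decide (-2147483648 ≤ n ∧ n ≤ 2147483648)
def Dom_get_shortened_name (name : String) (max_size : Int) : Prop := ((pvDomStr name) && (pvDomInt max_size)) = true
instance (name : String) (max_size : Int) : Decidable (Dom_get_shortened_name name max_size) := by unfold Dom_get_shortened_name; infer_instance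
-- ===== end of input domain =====

-- B replaces A's step-by-2 re-slicing/re-encoding while loop by a closed-form computation
-- of the kept prefix length (objective: faster on long truncated names).

-- ===== PORT A =====
-- len(s.encode('utf-8')): on the ASCII input domain every char is one UTF-8 byte, so this is the length
def get_str_size (s : List Char) : Int := (s.length : Int)

-- A's 'while get_str_size(name[:p]) > T: p -= 2' loop; fuel is only a totality guard:
-- under Pre_ (0 ≤ T) the loop stops within cs.length + 4 steps, so fuel 2*cs.length + 8 is never exhausted
-- (outside Pre_ the Python loop never terminates).
def pvLoopA (cs : List Char) (T : Int) : Nat → Int → Int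
  | 0, p => p
  | fuel + 1, p =>
      if get_str_size (PySem.List.slice cs none (some p)) > T then pvLoopA cs T fuel (p - 2) else p

def get_shortened_name (name : String) (max_size : Int) : String :=
  let cs := name.toList
  let P : Int := PySem.Chars.rfind cs ['(']
  if P ≠ -1 ∧ PySem.Chars.find cs [')'] ≠ -1 then
    let dop_len : Int := get_str_size (PySem.List.slice cs (some P) none)
    let p : Int := pvLoopA cs (max_size - dop_len - 2) (2 * cs.length + 8) P
    String.ofList (PySem.List.slice cs none (some p) ++ "...".toList ++ PySem.List.slice cs (some P) none)
  else
    let pos : Int := pvLoopA cs max_size (2 * cs.length + 8) ((cs.length : Int))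
    String.ofList (PySem.List.slice cs none (some pos) ++ "...".toList)

-- ===== PORT B =====
def get_shortened_name_alt (name : String) (max_size : Int) : String :=
  let cs := name.toList
  let n : Int := cs.length
  let P : Int := PySem.Chars.rfind cs ['(']
  let bst : Int × Int × List Char :=
    if P ≠ -1 ∧ PySem.Chars.isIn [')'] cs = true then
      (max_size - (n - P) - 2, P, cs.drop P.toNat)   -- name[P:] with 0 ≤ P
    else
      (max_size, n, [])
  let budget := bst.1
  let start := bst.2.1
  let tail := bst.2.2
  let keep : Int :=
    if start ≤ budget then start
    else
      let k0 := budget - PySem.Int.mod (start - budget) 2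
      if k0 < 0 then 0 else k0
  String.ofList (cs.take keep.toNat ++ "...".toList ++ tail)   -- name[:keep] with 0 ≤ keep

-- ===== PRECONDITION & SPEC =====
-- Pre_ excludes exactly the inputs on which A's while loop never terminates (the remaining byte
-- budget is negative, so the loop condition holds forever); A returns no value there.
def Pre_get_shortened_name (name : String) (max_size : Int) : Prop :=
  let cs := name.toList
  let P : Int := PySem.Chars.rfind cs ['(']
  if P ≠ -1 ∧ PySem.Chars.find cs [')'] ≠ -1 then
    0 ≤ max_size - ((cs.length : Int) - P) - 2
  else
    0 ≤ max_size
instance (name : String) (max_size : Int) : Decidable (Pre_get_shortened_name name max_size) := by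
  unfold Pre_get_shortened_name; infer_instance

def pvWitness_get_shortened_name : String × Int := ("ab (c)", 9)

def Spec_get_shortened_name (name : String) (max_size : Int) (out : String) : Prop := out = get_shortened_name_alt name max_size
instance (name : String) (max_size : Int) (out : String) : Decidable (Spec_get_shortened_name name max_size out) := by unfold Spec_get_shortened_name; infer_instance

-- ===== CLAIM (what is proved, stated in full; the proofs are below) =====
def Claim_equal_get_shortened_name : Prop := ∀ (name : String) (max_size : Int), Dom_get_shortened_name name max_size → Pre_get_shortened_name name max_size → Spec_get_shortened_name name max_size (get_shortened_name name max_size)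

-- ===== LEMMAS AND PROOFS =====

-- length of the Python prefix name[:p] (p possibly negative), as an Int
def pvF (n : Nat) (p : Int) : Int := max 0 (min (n : Int) (if p < 0 then (n : Int) + p else p))

lemma pv_slice_to_eq_take (cs : List Char) (p : Int) :
    PySem.List.slice cs none (some p) = cs.take (pvF cs.length p).toNat := by
  by_cases h : 0 ≤ p
  · rw [PySem.List.slice_to cs h, List.take_eq_take_iff]
    unfold pvF; split_ifs <;> omega
  · have hk : 0 < (-p).toNat := by omega
    have hp' : p = -(((-p).toNat : Nat) : Int) := by omega
    rw [hp', PySem.List.slice_to_neg_natCast cs (-p).toNat hk, List.take_eq_take_iff]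
    unfold pvF; split_ifs <;> omega

lemma pvF_len (cs : List Char) (p : Int) :
    ((PySem.List.slice cs none (some p)).length : Int) = pvF cs.length p := by
  rw [pv_slice_to_eq_take, List.length_take]
  unfold pvF; split_ifs <;> omega

lemma pvLoopA_stop (cs : List Char) (T : Int) (fuel : Nat) (p : Int)
    (h : pvF cs.length p ≤ T) : pvLoopA cs T fuel p = p := by
  cases fuel with
  | zero => rfl
  | succ f =>
      simp only [pvLoopA, get_str_size, pvF_len]
      rw [if_neg (by omega)]

lemma pvLoopA_neg (cs : List Char) (fuel : Nat) : ∀ p : Int, p < 0 →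
    (cs.length : Int) + p ≤ 2 * fuel → pvF cs.length (pvLoopA cs 0 fuel p) = 0 := by
  induction fuel with
  | zero =>
      intro p hp hf
      simp only [pvLoopA]
      unfold pvF; split_ifs <;> omega
  | succ f ih =>
      intro p hp hf
      by_cases h : pvF cs.length p ≤ 0
      · rw [pvLoopA_stop cs 0 (f + 1) p h]
        unfold pvF at h ⊢; split_ifs at h ⊢ <;> omega
      · simp only [pvLoopA, get_str_size, pvF_len]
        rw [if_pos (by omega)]
        exact ih (p - 2) (by omega) (by push_cast at hf ⊢; omega)

lemma pvLoopA_pos (cs : List Char) (T : Int) (hT : 0 ≤ T) (fuel : Nat) : ∀ p : Int, 0 ≤ p →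
    p ≤ (cs.length : Int) → p + (cs.length : Int) + 2 ≤ 2 * fuel →
    pvF cs.length (pvLoopA cs T fuel p) =
      if p ≤ T then p else if 0 ≤ T - (p - T) % 2 then T - (p - T) % 2 else 0 := by
  induction fuel with
  | zero => intro p h0 hn hf; exfalso; omega
  | succ f ih =>
      intro p h0 hn hf
      have hFp : pvF cs.length p = p := by unfold pvF; split_ifs <;> omega
      by_cases hple : p ≤ T
      · rw [pvLoopA_stop cs T (f + 1) p (by omega), if_pos hple]; exact hFp
      · simp only [pvLoopA, get_str_size, pvF_len]
        rw [if_pos (by omega)]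
        by_cases h2 : 0 ≤ p - 2
        · rw [ih (p - 2) h2 (by omega) (by push_cast at hf ⊢; omega)]
          split_ifs <;> omega
        · have hp1 : p = 1 := by omega
          have hT0 : T = 0 := by omega
          subst hp1; subst hT0
          rw [pvLoopA_neg cs f (1 - 2) (by omega) (by push_cast at hf ⊢; omega)]
          split_ifs <;> omega

lemma pv_rfind_go_bounds (s sub : List Char) : ∀ k : Nat,
    PySem.Chars.rfind.go s sub k = -1 ∨
      (0 ≤ PySem.Chars.rfind.go s sub k ∧ PySem.Chars.rfind.go s sub k ≤ (k : Int)) := by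
  intro k
  induction k with
  | zero =>
      simp only [PySem.Chars.rfind.go]
      split_ifs <;> simp
  | succ j ih =>
      simp only [PySem.Chars.rfind.go]
      split_ifs with h
      · right; constructor <;> (push_cast; omega)
      · rcases ih with h1 | ⟨h1, h2⟩
        · left; exact h1
        · right; exact ⟨h1, by push_cast; omega⟩

lemma pv_rfind_bounds (s sub : List Char) (h : PySem.Chars.rfind s sub ≠ -1) :
    0 ≤ PySem.Chars.rfind s sub ∧ PySem.Chars.rfind s sub ≤ (s.length : Int) := by
  unfold PySem.Chars.rfind at *
  rcases pv_rfind_go_bounds s sub s.length with h1 | h1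
  · exact absurd h1 h
  · exact h1

-- ===== VERDICT (by name: the statement is the Claim_ definition above) =====
theorem get_shortened_name_spec : Claim_equal_get_shortened_name := by
  intro name max_size hdom hpre
  unfold Spec_get_shortened_name
  unfold Pre_get_shortened_name at hpre
  simp only [get_shortened_name, get_shortened_name_alt]
  set cs := name.toList with hcs
  set P := PySem.Chars.rfind cs ['('] with hP
  have hc : (P ≠ -1 ∧ PySem.Chars.isIn [')'] cs = true) ↔ (P ≠ -1 ∧ PySem.Chars.find cs [')'] ≠ -1) := by
    constructor <;> rintro ⟨h1, h2⟩ <;> refine ⟨h1, ?_⟩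
    · rw [PySem.Chars.find_ne_neg_one_iff]; exact (PySem.Chars.isIn_iff_infix _ _).mp h2
    · rw [PySem.Chars.isIn_iff_infix]; exact (PySem.Chars.find_ne_neg_one_iff _ _).mp h2
  by_cases h : P ≠ -1 ∧ PySem.Chars.find cs [')'] ≠ -1
  · rw [if_pos h] at hpre ⊢
    rw [if_pos (hc.mpr h)]
    have hPb := pv_rfind_bounds cs ['('] h.1
    have hfrom : PySem.List.slice cs (some P) none = cs.drop P.toNat :=
      PySem.List.slice_from cs hPb.1
    have hdop : get_str_size (PySem.List.slice cs (some P) none) = (cs.length : Int) - P := by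
      rw [hfrom]; simp only [get_str_size, List.length_drop]; omega
    rw [hdop, hfrom]
    have hloop := pvLoopA_pos cs (max_size - ((cs.length : Int) - P) - 2) hpre
      (2 * cs.length + 8) P hPb.1 hPb.2 (by push_cast; omega)
    have hkeep : pvF cs.length
        (pvLoopA cs (max_size - ((cs.length : Int) - P) - 2) (2 * cs.length + 8) P) =
        (if P ≤ max_size - ((cs.length : Int) - P) - 2 then P
         else
           if max_size - ((cs.length : Int) - P) - 2 -
                PySem.Int.mod (P - (max_size - ((cs.length : Int) - P) - 2)) 2 < 0 then 0
           else max_size - ((cs.length : Int) - P) - 2 -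
                PySem.Int.mod (P - (max_size - ((cs.length : Int) - P) - 2)) 2) := by
      rw [hloop, PySem.Int.mod_eq_emod_of_pos (by norm_num)]
      split_ifs <;> omega
    rw [pv_slice_to_eq_take, hkeep]
  · rw [if_neg h] at hpre ⊢
    rw [if_neg (fun hb => h (hc.mp hb))]
    have hloop := pvLoopA_pos cs max_size hpre (2 * cs.length + 8) (cs.length : Int)
      (by positivity) le_rfl (by push_cast; omega)
    have hkeep : pvF cs.length (pvLoopA cs max_size (2 * cs.length + 8) (cs.length : Int)) =
        (if (cs.length : Int) ≤ max_size then (cs.length : Int)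
         else
           if max_size - PySem.Int.mod ((cs.length : Int) - max_size) 2 < 0 then 0
           else max_size - PySem.Int.mod ((cs.length : Int) - max_size) 2) := by
      rw [hloop, PySem.Int.mod_eq_emod_of_pos (by norm_num)]
      split_ifs <;> omega
    rw [pv_slice_to_eq_take, hkeep]
    simp
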